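-- pv_equiv track=rewrite | github.com/josh200501/experiment_icics | find_lib_imp.py | nodes2edges
-- ===== SOURCE A (Python) =====
-- def nodes2edges(nodes_seq):
--     last_node = None
--     edges = []
--     for node in nodes_seq:
--         if last_node == None:
--             last_node = node
--         else:
--             edges.append({"src":last_node, "dst":node})
--             last_node = node
--     return edges
-- ===== SOURCE B (Python) =====
-- def nodes2edges(nodes_seq):
--     items = list(nodes_seq)
--     return [{"src": p, "dst": c} for p, c in zip(items, items[1:])]
-- ===== Notes on version B (the rewrite author's own statement) =====
-- stated objective: idiomatic
-- what changed: Replaced the stateful previous-node loop with a single zip(items, items[1:]) pairwise comprehension.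
import Mathlib
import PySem

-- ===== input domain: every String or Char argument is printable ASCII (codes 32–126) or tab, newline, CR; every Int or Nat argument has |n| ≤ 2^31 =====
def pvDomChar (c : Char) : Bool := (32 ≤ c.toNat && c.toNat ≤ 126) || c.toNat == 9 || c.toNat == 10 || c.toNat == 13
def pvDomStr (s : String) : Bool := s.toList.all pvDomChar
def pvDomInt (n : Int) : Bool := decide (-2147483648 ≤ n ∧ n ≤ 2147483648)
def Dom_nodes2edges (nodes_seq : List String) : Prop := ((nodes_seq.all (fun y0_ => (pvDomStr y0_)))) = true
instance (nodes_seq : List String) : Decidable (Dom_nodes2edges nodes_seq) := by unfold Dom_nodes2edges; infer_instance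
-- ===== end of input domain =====

-- B replaces A's stateful previous-node sweep with a zip-with-tail pairwise comprehension (idiomatic; same cost).


-- ===== PORT A =====
-- A: loop with state (last_node : Option String, edges); since nodes are strings,
-- 'last_node == None' is Option.isNone (a string node never equals None).
def nodes2edges (nodes_seq : List String) : List (List (String × String)) :=
  (nodes_seq.foldl
    (fun (st : Option String × List (List (String × String))) node =>
      match st with
      | (last_node, edges) =>
        if last_node.isNone then (some node, edges)
        else (some node, edges ++ [[("src", last_node.getD ""), ("dst", node)]]))
    (none, [])).2

-- ===== PORT B =====
def nodes2edges_alt (nodes_seq : List String) : List (List (String × String)) :=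
  (nodes_seq.zip nodes_seq.tail).map (fun pc => [("src", pc.1), ("dst", pc.2)])

-- ===== PRECONDITION & SPEC =====
def Spec_nodes2edges (nodes_seq : List String) (out : List (List (String × String))) : Prop := out = nodes2edges_alt nodes_seq
instance (nodes_seq : List String) (out : List (List (String × String))) : Decidable (Spec_nodes2edges nodes_seq out) := by unfold Spec_nodes2edges; infer_instance

-- ===== CLAIM (what is proved, stated in full; the proofs are below) =====
def Claim_equal_nodes2edges : Prop := ∀ (nodes_seq : List String), Dom_nodes2edges nodes_seq → Spec_nodes2edges nodes_seq (nodes2edges nodes_seq)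

-- ===== LEMMAS AND PROOFS =====

-- Invariant: once the state holds (some p, acc), the fold appends exactly the pairwise edges.
theorem nodes2edges_fold_some (l : List String) (p : String) (acc : List (List (String × String))) :
    (l.foldl
      (fun (st : Option String × List (List (String × String))) node =>
        match st with
        | (last_node, edges) =>
          if last_node.isNone then (some node, edges)
          else (some node, edges ++ [[("src", last_node.getD ""), ("dst", node)]]))
      (some p, acc)).2
    = acc ++ ((p :: l).zip l).map (fun pc => [("src", pc.1), ("dst", pc.2)]) := by
  induction l generalizing p acc with
  | nil => simp
  | cons x xs ih =>
      simp only [List.foldl, List.zip_cons_cons, List.map, Option.isNone_some, Bool.false_eq_true,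
        if_false, Option.getD_some]
      rw [ih]
      simp

-- ===== VERDICT (by name: the statement is the Claim_ definition above) =====
theorem nodes2edges_spec : Claim_equal_nodes2edges := by
  intro nodes_seq _
  unfold Spec_nodes2edges nodes2edges nodes2edges_alt
  cases nodes_seq with
  | nil => rfl
  | cons x xs =>
      simp only [List.foldl, Option.isNone_none, if_true, List.tail_cons]
      rw [nodes2edges_fold_some]
      simp
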